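-- pv_equiv track=rewrite | github.com/TaeyanG4/Baekjoon | 백준/Bronze/10798. 세로읽기/세로읽기.py | solution
-- ===== SOURCE A (Python) =====
-- def solution(li):
--     ans = list()
--     for i in range(0,16):
--         for j in range(0,5):
--             try:
--                 ans.append(li[j][i])
--             except:
--                 pass
--     return "".join(ans)
-- ===== SOURCE B (Python) =====
-- def solution(li):
--     # Row-major single pass: walk each (truncated) row once, dropping every character
--     # into the bucket of its column; concatenating the buckets yields the column-wise reading.
--     cols = [[] for _ in range(16)]
--     for row in li[:5]:
--         for i, ch in enumerate(row[:16]):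
--             cols[i].append(ch)
--     return "".join("".join(c) for c in cols)
-- ===== Notes on version B (the rewrite author's own statement) =====
-- stated objective: alternative
-- what changed: B replaces A's column-major 16x5 probing under try/except with a single row-major pass that buckets each character into one of 16 per-column accumulators and then concatenates the buckets; the proof shows the two traversal orders agree.
import Mathlib
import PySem

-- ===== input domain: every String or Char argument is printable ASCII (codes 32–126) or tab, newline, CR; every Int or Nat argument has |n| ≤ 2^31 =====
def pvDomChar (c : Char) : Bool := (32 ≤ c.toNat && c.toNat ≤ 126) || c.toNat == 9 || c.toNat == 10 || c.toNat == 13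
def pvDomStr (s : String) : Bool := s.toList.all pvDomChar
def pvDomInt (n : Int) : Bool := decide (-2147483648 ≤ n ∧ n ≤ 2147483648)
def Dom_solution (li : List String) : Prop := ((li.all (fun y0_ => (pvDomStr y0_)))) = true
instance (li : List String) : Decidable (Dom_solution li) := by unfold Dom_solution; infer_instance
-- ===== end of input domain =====

-- B reads the grid in the opposite (row-major) order, bucketing characters into 16 per-column
-- accumulators in one pass instead of probing the 80 cells column-wise under try/except;
-- equal return value on every input (A never raises).

-- ===== PORT A =====
def solution (li : List String) : String :=
  let ans : List Char :=
    (PySem.List.pyRange 0 16).foldl (fun ans i =>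
      (PySem.List.pyRange 0 5).foldl (fun ans j =>
        match PySem.List.pyGet? li j with
        | none => ans                        -- li[j] raises IndexError → except: pass
        | some s =>
          match PySem.Str.pyGet? s i with
          | none => ans                      -- li[j][i] raises IndexError → except: pass
          | some c => ans ++ [c]) ans) []
  String.ofList ans                          -- "".join(ans), ans a list of 1-char strings

-- ===== PORT B =====
-- inner loop of B: for i, ch in enumerate(row[:16]): cols[i].append(ch)
-- (the enumerate index satisfies 0 ≤ i < 16 = len(cols), so cols[i].append(ch) is exactly
--  List.modify at index i.toNat — no clamping ever happens)
def bStep (cols : List (List Char)) (row : String) : List (List Char) :=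
  (PySem.List.enumerate (PySem.Str.slice row none (some 16)).toList 0).foldl
    (fun cols p => cols.modify p.1.toNat (fun l => l ++ [p.2])) cols

def solution_alt (li : List String) : String :=
  let cols := (PySem.List.slice li none (some 5)).foldl bStep (List.replicate 16 ([] : List Char))
  PySem.Str.join "" (cols.map String.ofList)   -- "".join("".join(c) for c in cols)

-- ===== PRECONDITION & SPEC =====
def Spec_solution (li : List String) (out : String) : Prop := out = solution_alt li
instance (li : List String) (out : String) : Decidable (Spec_solution li out) := by unfold Spec_solution; infer_instance

-- ===== CLAIM (what is proved, stated in full; the proofs are below) =====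
def Claim_equal_solution : Prop := ∀ (li : List String), Dom_solution li → Spec_solution li (solution li)

-- ===== LEMMAS AND PROOFS =====

-- the column at index i as A reads it: chars of the first five rows that are long enough
def colF (li : List String) (i : Int) : List Char :=
  (li.take 5).filterMap (fun s => PySem.Str.pyGet? s i)

lemma step_eq (li : List String) (i : Int) :
    (fun (ans : List Char) (j : Int) =>
      match PySem.List.pyGet? li j with
      | none => ans
      | some s =>
        match PySem.Str.pyGet? s i with
        | none => ans
        | some c => ans ++ [c])
    = fun (ans : List Char) (j : Int) =>
        ans ++ ((PySem.List.pyGet? li j).bind (fun s => PySem.Str.pyGet? s i)).toList := by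
  funext ans j
  cases PySem.List.pyGet? li j with
  | none => simp
  | some s =>
    simp only [PySem.Str.pyGet?_eq]
    cases h : PySem.List.pyGet? s.toList i <;> simp [h]

lemma flatMap_range_eq (g : String → Option Char) (li : List String) (n : Nat) :
    (List.range n).flatMap (fun k => ((li[k]?).bind g).toList)
      = (li.take n).flatMap (fun s => (g s).toList) := by
  induction n with
  | zero => simp
  | succ n ih =>
    rw [List.range_succ, List.flatMap_append, ih, List.take_add_one, List.flatMap_append]
    cases h : li[n]? <;> simp [h]

lemma inner_flatMap_eq (li : List String) (i : Int) :
    (PySem.List.pyRange 0 5).flatMap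
        (fun j => ((PySem.List.pyGet? li j).bind (fun s => PySem.Str.pyGet? s i)).toList)
      = colF li i := by
  rw [show (5 : Int) = ((5 : Nat) : Int) from rfl, PySem.List.pyRange_zero_nat,
      colF, List.filterMap_eq_flatMap_toList, ← flatMap_range_eq]
  simp [List.flatMap_map, PySem.List.pyGet?_natCast]

lemma A_eq (li : List String) :
    solution li = String.ofList ((PySem.List.pyRange 0 16).flatMap (colF li)) := by
  unfold solution
  simp only [step_eq, PySem.List.foldl_append_eq_flatMap, inner_flatMap_eq, List.nil_append]

lemma join_empty_eq (cols : List String) :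
    PySem.Str.join "" cols = String.ofList (cols.map String.toList).flatten := by
  have h : ∀ cs : List (List Char), List.intercalate [] cs = cs.flatten := by
    intro cs
    induction cs with
    | nil => rfl
    | cons c cs ih => cases cs <;> simp_all [List.intercalate, List.intersperse]
  simp [PySem.Str.join, PySem.Chars.join, h]

-- pointwise effect of B's inner enumerate-fold: bucket j receives the row's char at j (if any)
lemma enum_foldl_getElem? (cs : List Char) :
    ∀ (k : Nat) (cols : List (List Char)) (j : Nat),
    ((PySem.List.enumerate cs (k : Int)).foldl
        (fun cols p => cols.modify p.1.toNat (fun l => l ++ [p.2])) cols)[j]?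
      = (cols[j]?).map (fun l => l ++ (if k ≤ j then (cs[j - k]?).toList else [])) := by
  induction cs with
  | nil =>
    intro k cols j
    cases h : cols[j]? <;> simp [PySem.List.enumerate_nil, h]
  | cons c cs ih =>
    intro k cols j
    rw [PySem.List.enumerate_cons]
    simp only [List.foldl_cons]
    rw [show ((k : Int) + 1) = (((k + 1 : Nat)) : Int) by push_cast; ring, ih]
    rw [show ((k : Int)).toNat = k from Int.toNat_natCast k]
    rcases Nat.lt_trichotomy j k with hjk | hjk | hjk
    · rw [List.getElem?_modify_ne _ _ (by omega)]
      simp [Nat.not_le.mpr hjk, Nat.not_le.mpr (by omega : j < k + 1)]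
    · subst hjk
      rw [List.getElem?_modify_eq]
      cases cols[j]? <;>
        simp [Nat.not_le.mpr (by omega : j < j + 1)]
    · rw [List.getElem?_modify_ne _ _ (by omega)]
      cases cols[j]? with
      | none => simp
      | some l =>
        simp only [Option.map_some,
          if_pos (by omega : k + 1 ≤ j), if_pos (by omega : k ≤ j)]
        rw [show j - k = (j - (k + 1)) + 1 from by omega]
        simp

-- pointwise effect of B's outer fold over the rows
lemma rows_foldl_getElem? (rows : List String) :
    ∀ (cols : List (List Char)) (j : Nat),
    ((rows.foldl bStep cols)[j]?)
      = (cols[j]?).map (fun l =>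
          l ++ rows.flatMap (fun s => (((PySem.Str.slice s none (some 16)).toList)[j]?).toList)) := by
  induction rows with
  | nil => intro cols j; cases h : cols[j]? <;> simp [h]
  | cons r rows ih =>
    intro cols j
    simp only [List.foldl_cons]
    rw [ih, bStep, show (0 : Int) = ((0 : Nat) : Int) from rfl, enum_foldl_getElem?]
    cases h : cols[j]? <;> simp [List.append_assoc]

-- B's buckets, once filled, are exactly A's columns
lemma cols_final (li : List String) :
    (PySem.List.slice li none (some 5)).foldl bStep (List.replicate 16 ([] : List Char))
      = (List.range 16).map (fun j : Nat => colF li (j : Int)) := by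
  apply List.ext_getElem?
  intro j
  rw [rows_foldl_getElem?]
  by_cases hj : j < 16
  · rw [List.getElem?_replicate, if_pos hj]
    have hr : ((List.range 16).map (fun j : Nat => colF li (j : Int)))[j]? = some (colF li (j : Int)) := by
      rw [List.getElem?_map, List.getElem?_range hj]; rfl
    rw [hr]
    simp only [Option.map_some]
    congr 1
    rw [show PySem.List.slice li none (some 5) = li.take 5 from
          PySem.List.slice_to _ (by norm_num),
        colF, List.filterMap_eq_flatMap_toList, List.nil_append]
    apply List.flatMap_congr
    intro s _
    rw [PySem.Str.pyGet?_eq, PySem.Str.toList_slice,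
        show PySem.Chars.slice s.toList none (some 16) = s.toList.take 16 from
          PySem.List.slice_to _ (by norm_num),
        show PySem.Chars.pyGet? s.toList (j : Int) = PySem.List.pyGet? s.toList j from rfl,
        PySem.List.pyGet?_natCast, List.getElem?_take_of_lt hj]
  · rw [List.getElem?_replicate, if_neg hj]
    have : ((List.range 16).map (fun j : Nat => colF li (j : Int)))[j]? = none := by
      rw [List.getElem?_eq_none]; simp [Nat.le_of_not_lt hj]
    simp [this]

lemma B_eq (li : List String) :
    solution_alt li = String.ofList ((PySem.List.pyRange 0 16).flatMap (colF li)) := by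
  unfold solution_alt
  rw [cols_final, join_empty_eq]
  congr 1
  rw [show (16 : Int) = ((16 : Nat) : Int) from rfl, PySem.List.pyRange_zero_nat,
      List.flatMap_map, List.map_map, List.map_map, ← List.flatMap_def]
  apply List.flatMap_congr
  intro j _
  simp

-- ===== VERDICT (by name: the statement is the Claim_ definition above) =====
theorem solution_spec : Claim_equal_solution := by
  intro li _
  unfold Spec_solution
  rw [A_eq, B_eq]
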